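-- pv_equiv track=rewrite | github.com/neridoro/Python_Store | ex7.py | in_one_category
-- ===== SOURCE A (Python) =====
-- def in_both_category(data):
--     needed_list = []
--     for item in data:
--         for name in item.keys():
--             needed_list.append(name)
--     new_list = []
--     copy_needed_list = needed_list.copy()
--     for item in copy_needed_list:
--         needed_list.remove(item)
--         if item in needed_list:
--             new_list.append(item)
--     return sorted(list(set(new_list)))
--
-- def in_one_category(data):
--     needed_list = []
--     for item in data:
--         for name in item.keys():
--             needed_list.append(name)
--     both_list=in_both_category(data)
--     for item in both_list:
--         while item in needed_list:
--             needed_list.remove(item)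
--     return sorted(list(set(needed_list)))
-- ===== SOURCE B (Python) =====
-- def in_one_category(data):
--     seen = set()
--     dup = set()
--     for item in data:
--         for name in item.keys():
--             if name in seen:
--                 dup.add(name)
--             else:
--                 seen.add(name)
--     return sorted(seen - dup)
-- ===== Notes on version B (the rewrite author's own statement) =====
-- stated objective: faster
-- what changed: One pass over the key stream maintaining two sets (seen, dup) and returning sorted(seen - dup), instead of A's flattened list with multiplicity, a remove-based duplicate-collecting helper pass, and repeated while-remove subtraction.
import Mathlib
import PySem

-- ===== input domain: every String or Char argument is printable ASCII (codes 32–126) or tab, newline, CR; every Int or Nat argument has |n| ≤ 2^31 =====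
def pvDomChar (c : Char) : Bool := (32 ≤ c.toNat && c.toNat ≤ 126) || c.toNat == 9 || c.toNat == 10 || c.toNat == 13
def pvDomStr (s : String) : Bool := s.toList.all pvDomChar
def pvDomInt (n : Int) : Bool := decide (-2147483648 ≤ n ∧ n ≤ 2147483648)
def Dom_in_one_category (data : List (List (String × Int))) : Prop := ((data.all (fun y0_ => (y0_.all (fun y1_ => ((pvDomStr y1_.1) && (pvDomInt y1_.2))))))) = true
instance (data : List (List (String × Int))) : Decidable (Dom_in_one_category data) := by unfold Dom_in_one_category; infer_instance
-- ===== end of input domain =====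

-- B replaces A's list-with-multiplicity + remove-based duplicate helper + while-remove subtraction
-- by one pass over the key stream with two sets (seen, dup), returning sorted(seen - dup); faster as measured.

-- ===== PORT A =====
-- needed_list: for item in data: for name in item.keys(): needed_list.append(name)
def pvFlatten (data : List (List (String × Int))) : List String :=
  data.foldl (fun acc item => (item.map Prod.fst).foldl (fun a n => a ++ [n]) acc) []

-- while item in needed: needed.remove(item)   (the while loop of in_one_category)
def pvRemoveAll (xs : List String) (v : String) : List String :=
  match h : PySem.List.remove? xs v with
  | some ys => pvRemoveAll ys v
  | none => xs
termination_by xs.length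
decreasing_by
  have hv : v ∈ xs := by
    by_contra hv
    simpa using ((PySem.List.remove?_eq_none_iff xs v).2 hv).symm.trans h
  have h2 : ys = xs.erase v := by
    have h3 := (PySem.List.remove?_eq_some_erase xs v hv).symm.trans h
    simpa using h3.symm
  subst h2
  rw [List.length_erase_of_mem hv]
  have := List.length_pos_of_mem hv
  omega

def in_both_category (data : List (List (String × Int))) : List String :=
  let needed := pvFlatten data
  let p := needed.foldl
    (fun (st : List String × List String) item =>
      match PySem.List.remove? st.1 item with
      | some nd => (nd, if item ∈ nd then st.2 ++ [item] else st.2)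
      | none => st)   -- unreachable: ValueError cannot occur (each item is still present)
    (needed, [])
  PySem.List.sorted (PySem.Set.ofList p.2) (fun x => x) false

def in_one_category (data : List (List (String × Int))) : List String :=
  let needed := pvFlatten data
  let bothList := in_both_category data
  let needed' := bothList.foldl (fun nd item => pvRemoveAll nd item) needed
  PySem.List.sorted (PySem.Set.ofList needed') (fun x => x) false

-- ===== PORT B =====
def in_one_category_alt (data : List (List (String × Int))) : List String :=
  let p := data.foldl
    (fun (st : PySem.Set String × PySem.Set String) item =>
      (item.map Prod.fst).foldl
        (fun (st : PySem.Set String × PySem.Set String) name =>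
          if PySem.Set.contains st.1 name then (st.1, PySem.Set.add st.2 name)
          else (PySem.Set.add st.1 name, st.2)) st)
    (PySem.Set.empty, PySem.Set.empty)
  PySem.List.sorted (PySem.Set.diff p.1 p.2) (fun x => x) false

-- ===== PRECONDITION & SPEC =====
def Spec_in_one_category (data : List (List (String × Int))) (out : List String) : Prop := out = in_one_category_alt data
instance (data : List (List (String × Int))) (out : List String) : Decidable (Spec_in_one_category data out) := by unfold Spec_in_one_category; infer_instance

-- ===== CLAIM (what is proved, stated in full; the proofs are below) =====
def Claim_equal_in_one_category : Prop := ∀ (data : List (List (String × Int))), Dom_in_one_category data → Spec_in_one_category data (in_one_category data)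

-- ===== LEMMAS AND PROOFS =====

-- the flattened key stream
def pvKeys (data : List (List (String × Int))) : List String :=
  data.flatMap (fun item => item.map Prod.fst)

theorem foldl_append_one (ks : List String) (acc : List String) :
    ks.foldl (fun a n => a ++ [n]) acc = acc ++ ks := by
  induction ks generalizing acc with
  | nil => simp
  | cons k t ih => simp [List.foldl_cons, ih]

theorem pvFlatten_go (data : List (List (String × Int))) :
    ∀ acc, data.foldl (fun acc item => (item.map Prod.fst).foldl (fun a n => a ++ [n]) acc) acc =
      acc ++ pvKeys data := by
  induction data with
  | nil => intro acc; simp [pvKeys]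
  | cons it t ih =>
    intro acc
    rw [List.foldl_cons, foldl_append_one, ih]
    simp [pvKeys, List.flatMap_cons]

theorem pvFlatten_eq (data : List (List (String × Int))) : pvFlatten data = pvKeys data := by
  unfold pvFlatten
  rw [pvFlatten_go data []]
  rfl

-- pvRemoveAll removes every occurrence
theorem mem_pvRemoveAll (xs : List String) (v x : String) :
    x ∈ pvRemoveAll xs v ↔ x ∈ xs ∧ x ≠ v := by
  fun_induction pvRemoveAll xs v with
  | case1 xs ys h ih =>
    have hv : v ∈ xs := by
      by_contra hv
      simpa using ((PySem.List.remove?_eq_none_iff xs v).2 hv).symm.trans h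
    have h2 : ys = xs.erase v := by
      have h3 := (PySem.List.remove?_eq_some_erase xs v hv).symm.trans h
      simpa using h3.symm
    subst h2
    rw [ih]
    constructor
    · rintro ⟨hm, hne⟩
      exact ⟨(List.mem_erase_of_ne hne).1 hm, hne⟩
    · rintro ⟨hm, hne⟩
      exact ⟨(List.mem_erase_of_ne hne).2 hm, hne⟩
  | case2 xs h =>
    have hv : v ∉ xs := (PySem.List.remove?_eq_none_iff xs v).1 h
    constructor
    · intro hm
      exact ⟨hm, by rintro rfl; exact hv hm⟩
    · exact fun h => h.1

-- A's duplicate-collecting fold, generalized invariant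
theorem both_fold_mem (ys : List String) :
    ∀ (nd acc : List String), (∀ x, ys.count x ≤ nd.count x) →
    ∀ x, x ∈ (ys.foldl
      (fun (st : List String × List String) item =>
        match PySem.List.remove? st.1 item with
        | some nd => (nd, if item ∈ nd then st.2 ++ [item] else st.2)
        | none => st) (nd, acc)).2 ↔ x ∈ acc ∨ (x ∈ ys ∧ 2 ≤ nd.count x) := by
  induction ys with
  | nil => intro nd acc _ x; simp
  | cons v t ih =>
    intro nd acc hcnt x
    have hv : v ∈ nd := by
      have h1 := hcnt v
      rw [List.count_cons_self] at h1
      exact List.count_pos_iff.1 (by omega)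
    have hrw : PySem.List.remove? nd v = some (nd.erase v) :=
      PySem.List.remove?_eq_some_erase nd v hv
    have hcnt' : ∀ y, t.count y ≤ (nd.erase v).count y := by
      intro y
      have h0 := hcnt y
      by_cases hy : y = v
      · subst hy
        rw [List.count_erase_self]
        rw [List.count_cons_self] at h0
        omega
      · rw [List.count_erase_of_ne hy]
        rw [List.count_cons_of_ne (Ne.symm hy)] at h0
        exact h0
    have hdup : v ∈ nd.erase v ↔ 2 ≤ nd.count v := by
      rw [← List.count_pos_iff, List.count_erase_self]
      omega
    simp only [List.foldl_cons, hrw]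
    rw [ih (nd.erase v) _ hcnt' x]
    by_cases hx : x = v
    · subst hx
      by_cases h2 : 2 ≤ nd.count x
      · rw [if_pos (hdup.2 h2)]
        constructor
        · intro _
          exact Or.inr ⟨List.mem_cons_self, h2⟩
        · intro _
          exact Or.inl (List.mem_append_right acc List.mem_cons_self)
      · rw [if_neg (fun hm => h2 (hdup.1 hm)), List.count_erase_self]
        constructor
        · rintro (h | ⟨_, hc⟩)
          · exact Or.inl h
          · omega
        · rintro (h | ⟨_, hc⟩)
          · exact Or.inl h
          · exact absurd hc h2
    · have hmem : x ∈ nd.erase v ↔ x ∈ nd := List.mem_erase_of_ne hx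
      have hcnte : (nd.erase v).count x = nd.count x := List.count_erase_of_ne hx
      rw [hcnte]
      by_cases hin : v ∈ nd.erase v
      · rw [if_pos hin]
        simp only [List.mem_append, List.mem_cons, hx, false_or]
        tauto
      · rw [if_neg hin]
        simp only [List.mem_cons, hx, false_or]

theorem in_both_mem (data : List (List (String × Int))) (x : String) :
    x ∈ in_both_category data ↔ 2 ≤ (pvKeys data).count x := by
  unfold in_both_category
  simp only [PySem.List.mem_sorted, PySem.Set.mem_ofList]
  rw [both_fold_mem (pvFlatten data) (pvFlatten data) [] (fun _ => le_refl _) x]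
  rw [pvFlatten_eq]
  constructor
  · rintro (h | ⟨_, h⟩)
    · simp at h
    · exact h
  · intro h
    exact Or.inr ⟨List.count_pos_iff.1 (by omega), h⟩

theorem sub_fold_mem (bs : List String) :
    ∀ (nd : List String) (x : String),
      x ∈ bs.foldl (fun nd item => pvRemoveAll nd item) nd ↔ x ∈ nd ∧ x ∉ bs := by
  induction bs with
  | nil => intro nd x; simp
  | cons v t ih =>
    intro nd x
    rw [List.foldl_cons, ih, mem_pvRemoveAll]
    simp only [List.mem_cons]
    tauto

theorem in_one_mem (data : List (List (String × Int))) (x : String) :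
    x ∈ (in_both_category data).foldl (fun nd item => pvRemoveAll nd item) (pvFlatten data) ↔
      (pvKeys data).count x = 1 := by
  rw [sub_fold_mem, in_both_mem, pvFlatten_eq]
  constructor
  · rintro ⟨hm, hd⟩
    have h1 := List.count_pos_iff.2 hm
    omega
  · intro h
    exact ⟨List.count_pos_iff.1 (by omega), by omega⟩

-- generic: a fold over a flatMap is the nested fold
theorem foldl_flatMap {α β σ : Type} (l : List α) (f : α → List β) (g : σ → β → σ) (init : σ) :
    (l.flatMap f).foldl g init = l.foldl (fun acc a => (f a).foldl g acc) init := by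
  induction l generalizing init with
  | nil => rfl
  | cons a t ih => simp [List.flatMap_cons, List.foldl_append, ih]

-- B's fold, generalized invariant (membership + Nodup of both sets)
theorem alt_fold_mem (K : List String) :
    ∀ (seen dup : List String), seen.Nodup → dup.Nodup →
    (K.foldl
      (fun (st : PySem.Set String × PySem.Set String) name =>
        if PySem.Set.contains st.1 name then (st.1, PySem.Set.add st.2 name)
        else (PySem.Set.add st.1 name, st.2)) (seen, dup)).1.Nodup ∧
    (K.foldl
      (fun (st : PySem.Set String × PySem.Set String) name =>
        if PySem.Set.contains st.1 name then (st.1, PySem.Set.add st.2 name)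
        else (PySem.Set.add st.1 name, st.2)) (seen, dup)).2.Nodup ∧
    (∀ x, x ∈ (K.foldl
      (fun (st : PySem.Set String × PySem.Set String) name =>
        if PySem.Set.contains st.1 name then (st.1, PySem.Set.add st.2 name)
        else (PySem.Set.add st.1 name, st.2)) (seen, dup)).1 ↔ x ∈ seen ∨ x ∈ K) ∧
    (∀ x, x ∈ (K.foldl
      (fun (st : PySem.Set String × PySem.Set String) name =>
        if PySem.Set.contains st.1 name then (st.1, PySem.Set.add st.2 name)
        else (PySem.Set.add st.1 name, st.2)) (seen, dup)).2 ↔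
        x ∈ dup ∨ (x ∈ seen ∧ x ∈ K) ∨ 2 ≤ K.count x) := by
  induction K with
  | nil =>
    intro seen dup hs hd
    refine ⟨hs, hd, fun x => by simp, fun x => by simp⟩
  | cons v t ih =>
    intro seen dup hs hd
    by_cases hv : v ∈ seen
    · have hc : PySem.Set.contains seen v = true := (PySem.Set.contains_iff _ _).2 hv
      simp only [List.foldl_cons, hc, if_pos]
      obtain ⟨h1, h2, h3, h4⟩ := ih seen (PySem.Set.add dup v) hs (PySem.Set.nodup_add _ _ hd)
      refine ⟨h1, h2, fun x => ?_, fun x => ?_⟩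
      · rw [h3 x]
        simp only [List.mem_cons]
        constructor
        · rintro (h | h) <;> tauto
        · rintro (h | (rfl | h)) <;> tauto
      · rw [h4 x]
        simp only [PySem.Set.mem_add, List.mem_cons]
        by_cases hx : x = v
        · subst hx
          constructor
          · intro _
            exact Or.inr (Or.inl ⟨hv, Or.inl rfl⟩)
          · intro _
            exact Or.inl (Or.inr rfl)
        · rw [List.count_cons_of_ne (Ne.symm hx)]
          tauto
    · have hc : PySem.Set.contains seen v = false := by
        rw [← Bool.not_eq_true]
        exact fun hh => hv ((PySem.Set.contains_iff _ _).1 hh)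
      simp only [List.foldl_cons, hc, if_neg, Bool.false_eq_true, not_false_iff]
      obtain ⟨h1, h2, h3, h4⟩ := ih (PySem.Set.add seen v) dup (PySem.Set.nodup_add _ _ hs) hd
      refine ⟨h1, h2, fun x => ?_, fun x => ?_⟩
      · rw [h3 x]
        simp only [PySem.Set.mem_add, List.mem_cons]
        tauto
      · rw [h4 x]
        simp only [PySem.Set.mem_add, List.mem_cons]
        by_cases hx : x = v
        · subst hx
          rw [List.count_cons_self]
          have hxc : x ∈ t ↔ 1 ≤ t.count x := by rw [← List.count_pos_iff]; omega
          constructor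
          · rintro (h | ⟨(h' | h'), h⟩ | h)
            · tauto
            · exact Or.inr (Or.inr (by rw [hxc] at h; omega))
            · exact Or.inr (Or.inr (by rw [hxc] at h; omega))
            · exact Or.inr (Or.inr (by omega))
          · rintro (h | ⟨h, _⟩ | h)
            · tauto
            · exact absurd h hv
            · have : x ∈ t := by rw [hxc]; omega
              exact Or.inr (Or.inl ⟨Or.inr rfl, this⟩)
        · rw [List.count_cons_of_ne (Ne.symm hx)]
          constructor
          · rintro (h | ⟨(h' | h'), h⟩ | h)
            · tauto
            · tauto
            · exact absurd h' hx
            · tauto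
          · rintro (h | ⟨h, h'⟩ | h)
            · tauto
            · rcases h' with h' | h'
              · exact absurd h' hx
              · tauto
            · tauto

-- ===== VERDICT (by name: the statement is the Claim_ definition above) =====
theorem in_one_category_spec : Claim_equal_in_one_category := by
  intro data _
  show in_one_category data = in_one_category_alt data
  simp only [in_one_category, in_one_category_alt]
  have hK : data.foldl
      (fun (st : PySem.Set String × PySem.Set String) item =>
        (item.map Prod.fst).foldl
          (fun (st : PySem.Set String × PySem.Set String) name =>
            if PySem.Set.contains st.1 name then (st.1, PySem.Set.add st.2 name)
            else (PySem.Set.add st.1 name, st.2)) st)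
      (PySem.Set.empty, PySem.Set.empty) =
      (pvKeys data).foldl
        (fun (st : PySem.Set String × PySem.Set String) name =>
          if PySem.Set.contains st.1 name then (st.1, PySem.Set.add st.2 name)
          else (PySem.Set.add st.1 name, st.2))
        (PySem.Set.empty, PySem.Set.empty) :=
    (foldl_flatMap data (fun item => item.map Prod.fst) _ _).symm
  rw [hK]
  obtain ⟨h1, h2, h3, h4⟩ := alt_fold_mem (pvKeys data) PySem.Set.empty PySem.Set.empty
    List.nodup_nil List.nodup_nil
  apply PySem.List.sorted_eq_sorted_of_perm
  · exact fun a b h => h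
  · rw [List.perm_ext_iff_of_nodup (PySem.Set.nodup_ofList _) (PySem.Set.nodup_diff _ _ h1)]
    intro x
    rw [PySem.Set.mem_ofList, in_one_mem, PySem.Set.mem_diff, h3 x, h4 x]
    simp only [PySem.Set.empty, List.not_mem_nil, false_or]
    have := List.count_pos_iff (a := x) (l := pvKeys data)
    constructor
    · intro h
      refine ⟨this.1 (by omega), ?_⟩
      rintro (⟨h', _⟩ | h')
      · exact h' 
      · omega
    · rintro ⟨hm, hn⟩
      have h1 := this.2 hm
      by_contra hne
      exact hn (Or.inr (by omega))
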